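-- pv_equiv track=rewrite | github.com/Geunbaek/algorithm | programmers/[3차] 압축.py | solution
-- ===== SOURCE A (Python) =====
-- from collections import deque
--
-- def solution(msg):
--     alpha = {chr(i + ord('A')): i + 1 for i in range(26)}
--     answer = []
--     maxAlphaIndex = 27
--     msg = deque(msg)
--     while msg:
--         nowString = msg.popleft()
--
--         while msg and nowString + msg[0] in alpha:
--             nowString += msg.popleft()
--
--         answer.append(alpha[nowString])
--         if msg:
--             alpha[nowString + msg[0]] = maxAlphaIndex
--         maxAlphaIndex += 1
--
--     return answer
-- ===== SOURCE B (Python) =====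
-- def solution(msg):
--     # canonical single-pass streaming LZW: one flat loop, no deque, no inner scan
--     d = {chr(i + ord('A')): i + 1 for i in range(26)}
--     if not msg:
--         return []
--     out = []
--     nxt = 27
--     w = msg[0]
--     for c in msg[1:]:
--         if w + c in d:
--             w += c
--         else:
--             out.append(d[w])
--             d[w + c] = nxt
--             nxt += 1
--             w = c
--     out.append(d[w])
--     return out
-- ===== Notes on version B (the rewrite author's own statement) =====
-- stated objective: idiomatic
-- what changed: Replaces the deque with an inner greedy-extension while-loop by the textbook single-pass streaming LZW loop (one flat for-loop over the characters with a conditional emit and w=c reset); Pre_ excludes messages containing characters outside 'A'..'Z', on which A raises KeyError.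
import Mathlib
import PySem

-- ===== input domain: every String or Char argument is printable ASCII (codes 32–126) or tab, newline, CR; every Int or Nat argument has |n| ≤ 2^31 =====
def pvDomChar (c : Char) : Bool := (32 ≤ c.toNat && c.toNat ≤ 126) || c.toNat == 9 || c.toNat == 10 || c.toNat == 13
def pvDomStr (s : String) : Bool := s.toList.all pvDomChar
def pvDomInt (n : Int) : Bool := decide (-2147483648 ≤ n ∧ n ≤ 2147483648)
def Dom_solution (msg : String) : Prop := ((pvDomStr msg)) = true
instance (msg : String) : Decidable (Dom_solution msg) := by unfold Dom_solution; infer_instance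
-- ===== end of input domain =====

-- B replaces A's deque + inner greedy-extension while-loop by the textbook single-pass
-- streaming LZW loop (one flat pass, conditional emit, w = c reset): idiomatic, same cost.

-- ===== PORT A =====
-- words are represented as List Char (Python str keys) so the kernel can compute on them
def pvAlphaA : PySem.Dict (List Char) Int :=
  (PySem.List.pyRange 0 26 1).foldl
    (fun d i => d.insert [Char.ofNat (i + 65).toNat] (i + 1)) PySem.Dict.empty

-- inner `while msg and nowString + msg[0] in alpha: nowString += msg.popleft()`
def pvInnerA (alpha : PySem.Dict (List Char) Int) (now : List Char) :
    List Char → List Char × List Char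
  | [] => (now, [])
  | c :: rs =>
      if alpha.contains (now ++ [c]) then pvInnerA alpha (now ++ [c]) rs
      else (now, c :: rs)

theorem pvInnerA_len (alpha : PySem.Dict (List Char) Int) (now : List Char)
    (l : List Char) : (pvInnerA alpha now l).2.length ≤ l.length := by
  induction l generalizing now with
  | nil => simp [pvInnerA]
  | cons c rs ih =>
      simp only [pvInnerA]
      split
      · exact le_trans (ih _) (Nat.le_succ _)
      · exact le_refl _

-- outer while loop; `alpha[nowString]` raises KeyError when missing (excluded by Pre_),
-- ported as getD with default 0 there
def pvLoopA (alpha : PySem.Dict (List Char) Int) (idx : Int) :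
    List Char → List Int
  | [] => []
  | c :: rest =>
      let p := pvInnerA alpha [c] rest
      let alpha' : PySem.Dict (List Char) Int :=
        match p.2 with
        | [] => alpha
        | c' :: _ => alpha.insert (p.1 ++ [c']) idx
      alpha.getD p.1 0 :: pvLoopA alpha' (idx + 1) p.2
  termination_by l => l.length
  decreasing_by
    exact Nat.lt_succ_of_le (pvInnerA_len alpha [c] rest)

def solution (msg : String) : List Int := pvLoopA pvAlphaA 27 msg.toList

-- ===== PORT B =====
def pvAlphaB : PySem.Dict (List Char) Int :=
  (PySem.List.pyRange 0 26 1).foldl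
    (fun d i => d.insert [Char.ofNat (i + 65).toNat] (i + 1)) PySem.Dict.empty

-- the single for-loop of Source B over the state (d, nxt, w, out)
def pvLoopB (d : PySem.Dict (List Char) Int) (nxt : Int) (w : List Char)
    (out : List Int) : List Char → List Int
  | [] => out ++ [d.getD w 0]
  | c :: rest =>
      if d.contains (w ++ [c]) then pvLoopB d nxt (w ++ [c]) out rest
      else pvLoopB (d.insert (w ++ [c]) nxt) (nxt + 1) [c] (out ++ [d.getD w 0]) rest

def solution_alt (msg : String) : List Int :=
  match msg.toList with
  | [] => []
  | c :: rest => pvLoopB pvAlphaB 27 [c] [] rest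

-- ===== PRECONDITION & SPEC =====
-- Pre_ excludes messages with a character outside 'A'..'Z': there A raises KeyError
def Pre_solution (msg : String) : Prop :=
  msg.toList.all (fun c => 'A' ≤ c && c ≤ 'Z') = true
instance (msg : String) : Decidable (Pre_solution msg) := by
  unfold Pre_solution; infer_instance
def pvWitness_solution : String := "KAKAO"

def Spec_solution (msg : String) (out : List Int) : Prop := out = solution_alt msg
instance (msg : String) (out : List Int) : Decidable (Spec_solution msg out) := by
  unfold Spec_solution; infer_instance

-- ===== CLAIM (what is proved, stated in full; the proofs are below) =====
def Claim_equal_solution : Prop :=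
  ∀ (msg : String), Dom_solution msg → Pre_solution msg →
    Spec_solution msg (solution msg)

-- ===== LEMMAS AND PROOFS =====

-- B's streaming loop from state (alpha, idx, w) equals A's greedy extension of w
-- followed by A's outer loop on the leftover characters.
theorem pvLoopB_eq_loopA (rest : List Char) :
    ∀ (alpha : PySem.Dict (List Char) Int) (idx : Int) (w : List Char)
      (out : List Int),
      pvLoopB alpha idx w out rest =
        out ++ (alpha.getD (pvInnerA alpha w rest).1 0 ::
          pvLoopA
            (match (pvInnerA alpha w rest).2 with
             | [] => alpha
             | c' :: _ => alpha.insert ((pvInnerA alpha w rest).1 ++ [c']) idx)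
            (idx + 1) (pvInnerA alpha w rest).2) := by
  induction rest with
  | nil =>
      intro alpha idx w out
      simp [pvLoopB, pvInnerA, pvLoopA]
  | cons c rs ih =>
      intro alpha idx w out
      simp only [pvLoopB, pvInnerA]
      by_cases h : alpha.contains (w ++ [c])
      · simp only [h, if_true]
        exact ih alpha idx (w ++ [c]) out
      · simp only [h, Bool.false_eq_true, if_false]
        rw [ih (alpha.insert (w ++ [c]) idx) (idx + 1) [c] (out ++ [alpha.getD w 0])]
        simp only [pvLoopA, List.append_assoc, List.singleton_append]

theorem solution_spec : Claim_equal_solution := by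
  intro msg _ _
  unfold Spec_solution solution solution_alt
  have hab : pvAlphaB = pvAlphaA := rfl
  cases h : msg.toList with
  | nil => simp [pvLoopA]
  | cons c rest =>
      show pvLoopA pvAlphaA 27 (c :: rest) = pvLoopB pvAlphaB 27 [c] [] rest
      rw [hab, pvLoopB_eq_loopA rest pvAlphaA 27 [c] []]
      simp only [pvLoopA, List.nil_append]
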